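-- pv_equiv track=rewrite | github.com/austral-prog/tp-6-loops-gonzaloferreyra2007 | enumerate_list.py | enumerate_list
-- ===== SOURCE A (Python) =====
-- def enumerate_list(lst):
--         """
--         Dada una lista de strings, retorna una nueva lista donde cada elemento
--         tiene el formato "indice. valor". Los strings vacios se deben saltear
--         y no deben aparecer en la lista resultante.
--         El indice debe ser consecutivo (no el indice original).
--
--         Ejemplo: enumerate_list(["Red", "Green", "", "White"]) -> ["0. Red", "1. Green", "2. White"]
--         """
--         lista_nueva = []
--         conteo = 0
--         for list in lst:
--             if list != "":
--                 nuevo_elemento = f"{conteo}. {list}"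
--                 lista_nueva.append(nuevo_elemento)
--                 conteo = conteo + 1
--
--         return lista_nueva
-- ===== SOURCE B (Python) =====
-- def enumerate_list(lst):
--     return [
--         f"{i - lst[:i].count('')}. {s}"
--         for i, s in enumerate(lst)
--         if s != ""
--     ]
-- ===== Notes on version B (the rewrite author's own statement) =====
-- stated objective: alternative
-- what changed: Removes the running counter entirely: each kept element's index is computed arithmetically from its original position as i minus the number of empty strings in the prefix lst[:i].
import Mathlib
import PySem

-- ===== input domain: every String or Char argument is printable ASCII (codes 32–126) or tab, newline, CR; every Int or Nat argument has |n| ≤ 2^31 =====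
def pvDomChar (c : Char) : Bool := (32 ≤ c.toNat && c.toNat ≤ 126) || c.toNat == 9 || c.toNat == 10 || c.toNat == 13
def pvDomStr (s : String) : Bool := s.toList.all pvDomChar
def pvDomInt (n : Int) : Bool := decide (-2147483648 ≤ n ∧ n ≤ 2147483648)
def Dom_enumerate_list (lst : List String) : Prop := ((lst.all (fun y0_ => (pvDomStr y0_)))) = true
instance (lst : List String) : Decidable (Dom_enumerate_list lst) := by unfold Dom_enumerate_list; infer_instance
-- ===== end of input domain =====

-- ===== PORT A =====
-- B drops A's running counter: each kept element's index is recomputed as its original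
-- position minus the number of empty strings in the prefix before it (alternative, not faster).
def enumerate_list (lst : List String) : List String :=
  (lst.foldl
    (fun (st : List String × Int) s =>
      if s ≠ "" then (st.1 ++ [PySem.Int.toStr st.2 ++ ". " ++ s], st.2 + 1) else st)
    ([], 0)).1

-- ===== PORT B =====
def enumerate_list_alt (lst : List String) : List String :=
  ((PySem.List.enumerate lst).filter (fun p => p.2 ≠ "")).map
    (fun p =>
      PySem.Int.toStr (p.1 - ((PySem.List.slice lst none (some p.1)).count "" : Int))
        ++ ". " ++ p.2)

-- ===== PRECONDITION & SPEC =====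
def Spec_enumerate_list (lst : List String) (out : List String) : Prop := out = enumerate_list_alt lst
instance (lst : List String) (out : List String) : Decidable (Spec_enumerate_list lst out) := by unfold Spec_enumerate_list; infer_instance

-- ===== CLAIM (what is proved, stated in full; the proofs are below) =====
def Claim_equal_enumerate_list : Prop := ∀ (lst : List String), Dom_enumerate_list lst → Spec_enumerate_list lst (enumerate_list lst)

-- ===== LEMMAS AND PROOFS =====
-- common reference: the "emit with index n, increment on non-empty" recursion
def pvGo (lst : List String) (n : Int) : List String :=
  match lst with
  | [] => []
  | s :: t => if s ≠ "" then (PySem.Int.toStr n ++ ". " ++ s) :: pvGo t (n + 1) else pvGo t n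

theorem enumerate_list_fold (lst : List String) :
    ∀ (acc : List String) (n : Int),
      (lst.foldl
        (fun (st : List String × Int) s =>
          if s ≠ "" then (st.1 ++ [PySem.Int.toStr st.2 ++ ". " ++ s], st.2 + 1) else st)
        (acc, n)).1
      = acc ++ pvGo lst n := by
  induction lst with
  | nil => intro acc n; simp [pvGo]
  | cons s t ih =>
    intro acc n
    rw [List.foldl_cons]
    by_cases h : s = ""
    · rw [if_neg (by simp [h]), ih]; simp [pvGo, h]
    · rw [if_pos (by simp [h]), ih]; simp [pvGo, h]

theorem enumerate_list_alt_go (rest : List String) :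
    ∀ (pre : List String),
      ((PySem.List.enumerate rest (pre.length : Int)).filter (fun p => p.2 ≠ "")).map
        (fun p =>
          PySem.Int.toStr (p.1 - ((PySem.List.slice (pre ++ rest) none (some p.1)).count "" : Int))
            ++ ". " ++ p.2)
      = pvGo rest ((pre.length : Int) - (pre.count "" : Int)) := by
  induction rest with
  | nil => intro pre; simp [PySem.List.enumerate_nil, pvGo]
  | cons s t ih =>
    intro pre
    rw [PySem.List.enumerate_cons]
    have hslice : PySem.List.slice (pre ++ s :: t) none (some (pre.length : Int)) = pre := by
      rw [PySem.List.slice_to_natCast]; simp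
    have hih := ih (pre ++ [s])
    have hlist : (pre ++ [s]) ++ t = pre ++ s :: t := by simp
    rw [hlist] at hih
    simp only [ne_eq] at hih
    by_cases h : s = ""
    · subst h
      simp only [List.filter_cons, ne_eq, not_true_eq_false, decide_false, Bool.false_eq_true,
        if_false]
      rw [show ((pre.length : Int) + 1) = ((pre ++ [""]).length : Int) by simp, hih]
      simp [pvGo]
    · simp only [List.filter_cons, ne_eq, h, not_false_eq_true, decide_true, if_true,
        List.map_cons]
      rw [show ((pre.length : Int) + 1) = ((pre ++ [s]).length : Int) by simp, hih]
      rw [hslice]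
      simp [pvGo, h, List.count_append]
      congr 1
      ring

-- ===== VERDICT (by name: the statement is the Claim_ definition above) =====
theorem enumerate_list_spec : Claim_equal_enumerate_list := by
  intro lst _
  unfold Spec_enumerate_list enumerate_list enumerate_list_alt
  rw [enumerate_list_fold lst [] 0]
  have h := enumerate_list_alt_go lst []
  simpa using h.symm
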